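-- pv_equiv track=rewrite | github.com/ScribbleDribble/Distributed_Vigenere_Cracker | client/crack.py | generate_keys
-- ===== SOURCE A (Python) =====
-- def generate_keys(candidate_letters):
--     import itertools
--     cartesian_product = list(itertools.product(*candidate_letters))
--     keys = []
--     key = ""
--     for key_tuple in cartesian_product:
--         for char in key_tuple:
--             key += char
--
--         keys.append(key)
--         key = ""
--
--     return keys
-- ===== SOURCE B (Python) =====
-- def generate_keys(candidate_letters):
--     acc = [""]
--     for group in candidate_letters:
--         group = list(group)
--         acc = [prefix + c for prefix in acc for c in group]
--     return acc
-- ===== Notes on version B (the rewrite author's own statement) =====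
-- stated objective: simpler
-- what changed: Replaces itertools.product-then-join (build all tuples, then a second nested loop concatenating each tuple) with a single incremental fold that extends a list of prefix strings group by group.
import Mathlib
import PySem

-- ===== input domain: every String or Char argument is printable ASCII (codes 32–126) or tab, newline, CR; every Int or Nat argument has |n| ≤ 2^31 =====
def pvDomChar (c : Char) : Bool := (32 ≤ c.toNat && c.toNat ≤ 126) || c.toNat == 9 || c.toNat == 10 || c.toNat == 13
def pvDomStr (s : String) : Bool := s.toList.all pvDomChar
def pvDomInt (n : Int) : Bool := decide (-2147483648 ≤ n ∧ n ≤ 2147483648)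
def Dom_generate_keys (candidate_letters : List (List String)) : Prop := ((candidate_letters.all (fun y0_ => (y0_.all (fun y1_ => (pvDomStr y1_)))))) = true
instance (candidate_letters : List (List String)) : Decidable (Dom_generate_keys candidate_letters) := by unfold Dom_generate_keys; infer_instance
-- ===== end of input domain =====

-- ===== PORT A =====
-- B replaces itertools.product + tuple-joining with one incremental fold over the groups (objective: simpler).
-- itertools.product(*candidate_letters): leftmost factor varies slowest
def pyProduct (ls : List (List String)) : List (List String) :=
  match ls with
  | [] => [[]]
  | g :: rest => g.flatMap (fun x => (pyProduct rest).map (fun t => x :: t))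

def generate_keys (candidate_letters : List (List String)) : List String :=
  let cartesian_product := pyProduct candidate_letters
  (cartesian_product.foldl (fun (st : List String × String) key_tuple =>
      let key := key_tuple.foldl (fun k c => k ++ c) st.2
      (st.1 ++ [key], "")) ([], "")).1

-- ===== PORT B =====
def generate_keys_alt (candidate_letters : List (List String)) : List String :=
  candidate_letters.foldl (fun acc group => acc.flatMap (fun pre => group.map (fun c => pre ++ c))) [""]

-- ===== PRECONDITION & SPEC =====
def Spec_generate_keys (candidate_letters : List (List String)) (out : List String) : Prop := out = generate_keys_alt candidate_letters
instance (candidate_letters : List (List String)) (out : List String) : Decidable (Spec_generate_keys candidate_letters out) := by unfold Spec_generate_keys; infer_instance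

-- ===== CLAIM (what is proved, stated in full; the proofs are below) =====
def Claim_equal_generate_keys : Prop := ∀ (candidate_letters : List (List String)), Dom_generate_keys candidate_letters → Spec_generate_keys candidate_letters (generate_keys candidate_letters)

-- ===== LEMMAS AND PROOFS =====

-- ===== VERDICT (by name: the statement is the Claim_ definition above) =====

theorem foldl_str_shift (t : List String) (a b : String) :
    t.foldl (fun k c => k ++ c) (a ++ b) = a ++ t.foldl (fun k c => k ++ c) b := by
  induction t generalizing b with
  | nil => rfl
  | cons x xs ih => simp only [List.foldl_cons, String.append_assoc, ih]

theorem foldlA_acc (ts : List (List String)) (acc : List String) :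
    (ts.foldl (fun (st : List String × String) key_tuple =>
      let key := key_tuple.foldl (fun k c => k ++ c) st.2
      (st.1 ++ [key], "")) (acc, "")).1
    = acc ++ ts.map (fun t => t.foldl (fun k c => k ++ c) "") := by
  induction ts generalizing acc with
  | nil => simp
  | cons t ts ih => simp [ih]

theorem keyA_eq (ls : List (List String)) :
    (pyProduct ls).map (fun t => t.foldl (fun k c => k ++ c) "") = generate_keys_alt ls := by
  suffices h : ∀ (acc : List String),
      ls.foldl (fun acc group => acc.flatMap (fun pre => group.map (fun c => pre ++ c))) acc
      = acc.flatMap (fun p => (pyProduct ls).map (fun t => p ++ t.foldl (fun k c => k ++ c) "")) by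
    have := h [""]
    simp only [generate_keys_alt, this]
    simp
  induction ls with
  | nil =>
    intro acc
    simp [pyProduct]
  | cons g ls ih =>
    intro acc
    simp only [List.foldl_cons, ih, List.flatMap_assoc, List.flatMap_map, pyProduct,
      List.map_flatMap, List.map_map]
    congr 1; funext p
    congr 1; funext x
    congr 1; funext t
    simp only [Function.comp, List.foldl_cons]
    rw [show ("" : String) ++ x = x ++ "" by simp, foldl_str_shift, String.append_assoc]

theorem generate_keys_spec : Claim_equal_generate_keys := by
  intro ls _
  unfold Spec_generate_keys generate_keys
  simp only []
  rw [foldlA_acc, List.nil_append, keyA_eq]
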